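-- pv_equiv track=rewrite | github.com/ag-ettel/openchart-health | pipeline/normalize/nh_mds_quality.py | _derive_measure_period
-- ===== SOURCE A (Python) =====
-- def _derive_measure_period(raw: dict[str, str]) -> str:
--     """Reconstruct measure_period when CMS doesn't supply it directly.
--
--     Modern archives (2019-06+) ship `measure_period` like "2024Q4-2025Q3".
--     The 2019-01 archive omits that field but provides per-quarter labels
--     (`q1_quarter` ... `q4_quarter`); we derive the range from the earliest
--     and latest of those.
--     """
--     explicit = (raw.get("measure_period") or "").strip()
--     if explicit:
--         return explicit
--
--     quarters = [
--         (raw.get(f"{q.lower()}_quarter") or "").strip()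
--         for q in ("Q1", "Q2", "Q3", "Q4")
--     ]
--     quarters = [q for q in quarters if q]
--     if not quarters:
--         return ""
--     sorted_q = sorted(quarters)
--     if sorted_q[0] == sorted_q[-1]:
--         return sorted_q[0]
--     return f"{sorted_q[0]}-{sorted_q[-1]}"
-- ===== SOURCE B (Python) =====
-- def _derive_measure_period(raw: dict[str, str]) -> str:
--     explicit = (raw.get("measure_period") or "").strip()
--     if explicit:
--         return explicit
--
--     # single pass with running min/max accumulators; no intermediate list, no sort
--     lo = hi = None
--     for i in (1, 2, 3, 4):
--         s = (raw.get(f"q{i}_quarter") or "").strip()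
--         if s:
--             if lo is None or s < lo:
--                 lo = s
--             if hi is None or hi < s:
--                 hi = s
--     if lo is None:
--         return ""
--     return lo if lo == hi else f"{lo}-{hi}"
-- ===== Notes on version B (the rewrite author's own statement) =====
-- stated objective: alternative
-- what changed: Replaces A's build-a-filtered-list-then-sort-then-index-endpoints pipeline with a single loop over the four quarter keys that maintains running lo/hi accumulators (no intermediate list, no sort).
import Mathlib
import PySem

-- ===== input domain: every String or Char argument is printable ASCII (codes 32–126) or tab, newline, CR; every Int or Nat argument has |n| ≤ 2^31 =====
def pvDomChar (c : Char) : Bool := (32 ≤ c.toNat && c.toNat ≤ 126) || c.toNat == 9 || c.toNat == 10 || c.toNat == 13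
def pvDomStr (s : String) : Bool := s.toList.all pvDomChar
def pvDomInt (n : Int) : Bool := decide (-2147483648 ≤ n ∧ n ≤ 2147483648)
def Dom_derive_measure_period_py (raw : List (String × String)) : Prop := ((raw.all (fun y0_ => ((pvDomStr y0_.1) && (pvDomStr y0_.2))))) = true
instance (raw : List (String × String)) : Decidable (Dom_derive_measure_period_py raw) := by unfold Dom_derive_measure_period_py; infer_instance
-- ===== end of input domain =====

-- B replaces A's filter-then-sort-then-index-endpoints pipeline with one loop over the four
-- quarter keys keeping running lo/hi accumulators (no intermediate list, no sort); objective: alternative.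

-- ===== PORT A =====
-- (raw.get(k) or "").strip()
def pvAGet (raw : List (String × String)) (k : String) : String :=
  PySem.Str.strip ((List.lookup k raw).getD "")

def derive_measure_period_py (raw : List (String × String)) : String :=
  let explicit := pvAGet raw "measure_period"
  if explicit ≠ "" then explicit
  else
    let quarters := ["Q1", "Q2", "Q3", "Q4"].map
      (fun q => pvAGet raw (PySem.Str.lower q ++ "_quarter"))
    let quarters := quarters.filter (fun q => q ≠ "")
    if quarters = [] then ""
    else
      let sorted_q := PySem.List.sorted quarters (fun x => x) false
      if PySem.List.pyGetD sorted_q 0 "" = PySem.List.pyGetD sorted_q (-1) "" then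
        PySem.List.pyGetD sorted_q 0 ""
      else
        PySem.List.pyGetD sorted_q 0 "" ++ "-" ++ PySem.List.pyGetD sorted_q (-1) ""

-- ===== PORT B =====
-- the loop body of B: skip empty s, otherwise update the running (lo, hi) accumulators
def pvStep (st : Option String × Option String) (s : String) : Option String × Option String :=
  if s ≠ "" then
    ((match st.1 with | none => some s | some lo => if s < lo then some s else some lo),
     (match st.2 with | none => some s | some hi => if hi < s then some s else some hi))
  else st

def derive_measure_period_py_alt (raw : List (String × String)) : String :=
  let explicit := PySem.Str.strip ((List.lookup "measure_period" raw).getD "")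
  if explicit ≠ "" then explicit
  else
    let st := ([1, 2, 3, 4] : List Int).foldl (fun st i =>
      pvStep st (PySem.Str.strip
        ((List.lookup ("q" ++ PySem.Int.toStr i ++ "_quarter") raw).getD ""))) (none, none)
    match st.1, st.2 with
    | none, _ => ""
    | some lo, none => lo   -- unreachable: lo and hi are set together
    | some lo, some hi => if lo = hi then lo else lo ++ "-" ++ hi

-- ===== PRECONDITION & SPEC =====
def Spec_derive_measure_period_py (raw : List (String × String)) (out : String) : Prop := out = derive_measure_period_py_alt raw
instance (raw : List (String × String)) (out : String) : Decidable (Spec_derive_measure_period_py raw out) := by unfold Spec_derive_measure_period_py; infer_instance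

-- ===== CLAIM (what is proved, stated in full; the proofs are below) =====
def Claim_equal_derive_measure_period_py : Prop := ∀ (raw : List (String × String)), Dom_derive_measure_period_py raw → Spec_derive_measure_period_py raw (derive_measure_period_py raw)

-- ===== LEMMAS AND PROOFS =====

def pvUpdMin (o : Option String) (s : String) : Option String :=
  match o with | none => some s | some lo => if s < lo then some s else some lo

def pvUpdMax (o : Option String) (s : String) : Option String :=
  match o with | none => some s | some hi => if hi < s then some s else some hi

-- the pair fold splits into the two independent folds over the filtered list
theorem foldl_step_split (qs : List String) (a b : Option String) :
    qs.foldl pvStep (a, b)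
      = ((qs.filter (fun s => s ≠ "")).foldl pvUpdMin a,
         (qs.filter (fun s => s ≠ "")).foldl pvUpdMax b) := by
  induction qs generalizing a b with
  | nil => rfl
  | cons s t ih =>
    by_cases hs : s = ""
    · simp [hs, pvStep, ih]
    · simp only [List.foldl_cons, List.filter_cons, hs, pvStep, if_pos, ne_eq,
        not_false_iff, decide_true]
      exact ih _ _

theorem updMin_some (x s : String) : pvUpdMin (some x) s = some (min x s) := by
  show (if s < x then some s else some x) = some (min x s)
  rcases lt_or_ge s x with h | h
  · rw [if_pos h, min_eq_right h.le]
  · rw [if_neg (not_lt.mpr h), min_eq_left h]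

theorem updMax_some (x s : String) : pvUpdMax (some x) s = some (max x s) := by
  show (if x < s then some s else some x) = some (max x s)
  rcases lt_or_ge x s with h | h
  · rw [if_pos h, max_eq_right h.le]
  · rw [if_neg (not_lt.mpr h), max_eq_left h]

theorem foldl_updMin_some (t : List String) (x : String) :
    t.foldl pvUpdMin (some x) = some (t.foldl min x) := by
  induction t generalizing x with
  | nil => rfl
  | cons s u ih => rw [List.foldl_cons, updMin_some, ih, List.foldl_cons]

theorem foldl_updMax_some (t : List String) (x : String) :
    t.foldl pvUpdMax (some x) = some (t.foldl max x) := by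
  induction t generalizing x with
  | nil => rfl
  | cons s u ih => rw [List.foldl_cons, updMax_some, ih, List.foldl_cons]

theorem foldl_updMin_eq_min? (qs : List String) :
    qs.foldl pvUpdMin none = PySem.List.min? qs (fun x => x) := by
  cases qs with
  | nil => rfl
  | cons x t =>
    rw [List.foldl_cons, show pvUpdMin none x = some x from rfl, foldl_updMin_some,
      PySem.List.min?_id_cons]

theorem foldl_updMax_eq_max? (qs : List String) :
    qs.foldl pvUpdMax none = PySem.List.max? qs (fun x => x) := by
  cases qs with
  | nil => rfl
  | cons x t =>
    rw [List.foldl_cons, show pvUpdMax none x = some x from rfl, foldl_updMax_some,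
      PySem.List.max?_id_cons]

theorem head_sorted_eq_min (qs : List String) (h : qs ≠ []) :
    PySem.List.pyGetD (PySem.List.sorted qs (fun x => x) false) 0 ""
      = (PySem.List.min? qs (fun x => x)).getD "" := by
  cases hs : PySem.List.sorted qs (fun x => x) false with
  | nil => exact absurd ((PySem.List.sorted_eq_nil_iff qs _ false).mp hs) h
  | cons m t =>
    rw [PySem.List.pyGetD_zero_cons]
    have hm : m ∈ qs := (PySem.List.mem_sorted qs _ false m).mp (hs ▸ List.mem_cons_self)
    cases hmn : PySem.List.min? qs (fun x => x) with
    | none => exact absurd ((PySem.List.min?_eq_none_iff qs _).mp hmn) h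
    | some mn =>
      simp only [Option.getD_some]
      exact le_antisymm (PySem.List.key_head_sorted_le qs _ hs mn (PySem.List.min?_mem hmn))
        (PySem.List.min?_isMin hmn m hm)

theorem last_sorted_eq_max (qs : List String) (h : qs ≠ []) :
    PySem.List.pyGetD (PySem.List.sorted qs (fun x => x) false) (-1) ""
      = (PySem.List.max? qs (fun x => x)).getD "" := by
  have hs : PySem.List.sorted qs (fun x => x) false ≠ [] := by
    simpa [PySem.List.sorted_eq_nil_iff] using h
  rw [PySem.List.pyGetD_neg_one _ _ hs]
  cases hmx : PySem.List.max? qs (fun x => x) with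
  | none => exact absurd ((PySem.List.max?_eq_none_iff qs _).mp hmx) h
  | some mx =>
    simp only [Option.getD_some]
    have hlast_mem : (PySem.List.sorted qs (fun x => x) false).getLast hs ∈ qs :=
      (PySem.List.mem_sorted qs _ false _).mp (List.getLast_mem hs)
    refine le_antisymm (PySem.List.max?_isMax hmx _ hlast_mem) ?_
    have hmx_mem : mx ∈ PySem.List.sorted qs (fun x => x) false :=
      (PySem.List.mem_sorted qs _ false mx).mpr (PySem.List.max?_mem hmx)
    obtain ⟨p, hp, hpe⟩ := List.getElem_of_mem hmx_mem
    rw [List.getLast_eq_getElem]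
    calc mx = (PySem.List.sorted qs (fun x => x) false)[p] := hpe.symm
      _ ≤ _ := PySem.List.key_sorted_getElem_mono qs (fun x => x) (by omega) (by omega)


-- the common core: A's sort-and-index body equals B's running-extrema fold, over any labels
theorem core_eq (qs : List String) :
    (let fs := qs.filter (fun s => s ≠ "")
     if fs = [] then ""
     else
       let sorted_q := PySem.List.sorted fs (fun x => x) false
       if PySem.List.pyGetD sorted_q 0 "" = PySem.List.pyGetD sorted_q (-1) "" then
         PySem.List.pyGetD sorted_q 0 ""
       else
         PySem.List.pyGetD sorted_q 0 "" ++ "-" ++ PySem.List.pyGetD sorted_q (-1) "")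
    = (let st := qs.foldl pvStep (none, none)
       match st.1, st.2 with
       | none, _ => ""
       | some lo, none => lo
       | some lo, some hi => if lo = hi then lo else lo ++ "-" ++ hi) := by
  rw [foldl_step_split, foldl_updMin_eq_min?, foldl_updMax_eq_max?]
  by_cases hfs : qs.filter (fun s => s ≠ "") = []
  · rw [show PySem.List.min? (qs.filter (fun s => s ≠ "")) (fun x => x) = none from
      (PySem.List.min?_eq_none_iff _ _).mpr hfs]
    simp only [if_pos hfs]
  · simp only [if_neg hfs]
    rw [head_sorted_eq_min _ hfs, last_sorted_eq_max _ hfs]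
    cases hmn : PySem.List.min? (qs.filter (fun s => s ≠ "")) (fun x => x) with
    | none => exact absurd ((PySem.List.min?_eq_none_iff _ _).mp hmn) hfs
    | some mn =>
      cases hmx : PySem.List.max? (qs.filter (fun s => s ≠ "")) (fun x => x) with
      | none => exact absurd ((PySem.List.max?_eq_none_iff _ _).mp hmx) hfs
      | some mx => simp only [Option.getD_some]

-- ===== VERDICT (by name: the statement is the Claim_ definition above) =====
set_option maxHeartbeats 1000000 in
theorem derive_measure_period_py_spec : Claim_equal_derive_measure_period_py := by
  intro raw _
  unfold Spec_derive_measure_period_py derive_measure_period_py derive_measure_period_py_alt pvAGet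
  simp only [List.map, List.foldl]
  rw [show PySem.Str.lower "Q1" ++ "_quarter" = "q1_quarter" from by decide,
      show PySem.Str.lower "Q2" ++ "_quarter" = "q2_quarter" from by decide,
      show PySem.Str.lower "Q3" ++ "_quarter" = "q3_quarter" from by decide,
      show PySem.Str.lower "Q4" ++ "_quarter" = "q4_quarter" from by decide,
      show "q" ++ PySem.Int.toStr 1 ++ "_quarter" = "q1_quarter" from by decide,
      show "q" ++ PySem.Int.toStr 2 ++ "_quarter" = "q2_quarter" from by decide,
      show "q" ++ PySem.Int.toStr 3 ++ "_quarter" = "q3_quarter" from by decide,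
      show "q" ++ PySem.Int.toStr 4 ++ "_quarter" = "q4_quarter" from by decide]
  by_cases h1 : PySem.Str.strip ((List.lookup "measure_period" raw).getD "") ≠ ""
  · rw [if_pos h1, if_pos h1]
  · rw [if_neg h1, if_neg h1]
    exact core_eq [PySem.Str.strip ((List.lookup "q1_quarter" raw).getD ""),
      PySem.Str.strip ((List.lookup "q2_quarter" raw).getD ""),
      PySem.Str.strip ((List.lookup "q3_quarter" raw).getD ""),
      PySem.Str.strip ((List.lookup "q4_quarter" raw).getD "")]
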